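-- pv_equiv track=rewrite | github.com/suh-fee/nyuCoursework | Intro to Python Labs/lab8.py | binaryFlip
-- ===== SOURCE A (Python) =====
-- def binaryFlip(binary_ini):
--     step = 0
--     digit = 0
--     for i in range(len(binary_ini)):
--         if binary_ini[i] == "1":
--             binary_ini = binary_ini[:i] + "0" + binary_ini[i+1:]
--         elif binary_ini[i] == "0":
--             binary_ini = binary_ini[:i] + "1" + binary_ini[i+1:]
--     for i in range(len(binary_ini), 0, -1):
--         if binary_ini[i-1] == "1":
--             digit += 2**step
--             step += 1
--         else:
--             step += 1
--     return binary_ini, digit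
-- ===== SOURCE B (Python) =====
-- def binaryFlip(binary_ini):
--     flipped = []
--     digit = 0
--     for c in binary_ini:
--         f = '0' if c == '1' else ('1' if c == '0' else c)
--         flipped.append(f)
--         digit = digit * 2 + (1 if f == '1' else 0)
--     return ''.join(flipped), digit
-- ===== Notes on version B (the rewrite author's own statement) =====
-- stated objective: alternative
-- what changed: Single left-to-right pass appending the flipped character and accumulating the decimal value by Horner's rule (digit = digit*2 + bit), instead of A's in-place slice-rewriting flip pass followed by a second right-to-left powers-of-two pass.
import Mathlib
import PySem

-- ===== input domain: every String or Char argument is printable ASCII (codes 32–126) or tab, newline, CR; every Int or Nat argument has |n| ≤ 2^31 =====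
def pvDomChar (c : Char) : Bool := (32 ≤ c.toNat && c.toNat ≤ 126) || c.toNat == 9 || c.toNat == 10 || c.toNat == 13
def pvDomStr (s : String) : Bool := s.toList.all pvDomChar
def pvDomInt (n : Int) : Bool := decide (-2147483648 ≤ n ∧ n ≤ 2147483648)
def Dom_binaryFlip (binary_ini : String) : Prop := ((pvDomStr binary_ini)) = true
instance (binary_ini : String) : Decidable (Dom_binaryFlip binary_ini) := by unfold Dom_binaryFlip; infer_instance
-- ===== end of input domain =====

-- B replaces A's slice-rebuilding flip pass + second right-to-left powers-of-two pass
-- by one left-to-right pass with Horner accumulation (objective: alternative single-pass algorithm).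

-- ===== PORT A =====
-- one iteration of A's first loop: rebuild the string by slicing around position i
def pvStepFlip (s : List Char) (i : Int) : List Char :=
  if PySem.List.pyGet? s i = some '1' then
    PySem.List.slice s none (some i) ++ ['0'] ++ PySem.List.slice s (some (i + 1)) none
  else if PySem.List.pyGet? s i = some '0' then
    PySem.List.slice s none (some i) ++ ['1'] ++ PySem.List.slice s (some (i + 1)) none
  else s

-- one iteration of A's second loop: (step, digit) updated from character at index i-1
def pvStepVal (m : List Char) (sd : Nat × Int) (i : Int) : Nat × Int :=
  if PySem.List.pyGet? m (i - 1) = some '1' then (sd.1 + 1, sd.2 + 2 ^ sd.1)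
  else (sd.1 + 1, sd.2)

def binaryFlip (binary_ini : String) : String × Int :=
  let l0 := binary_ini.toList
  let flipped := (PySem.List.pyRange 0 (l0.length : Int) 1).foldl pvStepFlip l0
  let sd := (PySem.List.pyRange (flipped.length : Int) 0 (-1)).foldl (pvStepVal flipped) (0, 0)
  (String.ofList flipped, sd.2)

-- ===== PORT B =====
def binaryFlip_alt (binary_ini : String) : String × Int :=
  let r := binary_ini.toList.foldl
    (fun (acc : List Char × Int) c =>
      let f := if c = '1' then '0' else if c = '0' then '1' else c
      (acc.1 ++ [f], acc.2 * 2 + (if f = '1' then 1 else 0))) ([], 0)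
  (String.ofList r.1, r.2)

-- ===== PRECONDITION & SPEC =====
def Spec_binaryFlip (binary_ini : String) (out : String × Int) : Prop := out = binaryFlip_alt binary_ini
instance (binary_ini : String) (out : String × Int) : Decidable (Spec_binaryFlip binary_ini out) := by unfold Spec_binaryFlip; infer_instance

-- ===== CLAIM (what is proved, stated in full; the proofs are below) =====
def Claim_equal_binaryFlip : Prop := ∀ (binary_ini : String), Dom_binaryFlip binary_ini → Spec_binaryFlip binary_ini (binaryFlip binary_ini)

-- ===== LEMMAS AND PROOFS =====
def pvFlipC (c : Char) : Char := if c = '1' then '0' else if c = '0' then '1' else c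
def pvBit (c : Char) : Int := if c = '1' then 1 else 0
def pvV (l : List Char) : Int := l.foldl (fun d c => d * 2 + pvBit c) 0

lemma pvV_append (l : List Char) (c : Char) : pvV (l ++ [c]) = pvV l * 2 + pvBit c := by
  simp [pvV, List.foldl_append]

lemma altFold (l : List Char) (a : List Char) (d : Int) :
    l.foldl (fun (acc : List Char × Int) c =>
      let f := if c = '1' then '0' else if c = '0' then '1' else c
      (acc.1 ++ [f], acc.2 * 2 + (if f = '1' then 1 else 0))) (a, d)
    = (a ++ l.map pvFlipC, l.foldl (fun d c => d * 2 + pvBit (pvFlipC c)) d) := by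
  induction l generalizing a d with
  | nil => simp
  | cons c t ih =>
    simp only [List.foldl_cons, List.map_cons, ih, pvFlipC, pvBit]
    exact Prod.ext (by simp) rfl

lemma flipLoop_eq (m : List Char) (n : Nat) (hn : n ≤ m.length) :
    (PySem.List.pyRange 0 (n : Int) 1).foldl pvStepFlip m
      = (m.take n).map pvFlipC ++ m.drop n := by
  induction n with
  | zero => simp [PySem.List.pyRange_one_eq_nil]
  | succ n ih =>
    have hn' : n ≤ m.length := Nat.le_of_succ_le hn
    have hlt : n < m.length := hn
    have hcast : ((n + 1 : Nat) : Int) = (n : Int) + 1 := by push_cast; ring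
    rw [hcast, PySem.List.pyRange_one_succ_right (Int.natCast_nonneg n),
        List.foldl_append, ih hn']
    set s := (m.take n).map pvFlipC ++ m.drop n with hs
    have hlen : ((m.take n).map pvFlipC).length = n := by simp [Nat.min_eq_left hn']
    have hget : PySem.List.pyGet? s (n : Int) = some m[n] := by
      rw [PySem.List.pyGet?_natCast, hs]
      rw [List.getElem?_append_right (by omega)]
      rw [hlen]
      simp [List.getElem?_drop]
    have htake : s.take n = (m.take n).map pvFlipC := List.take_left' hlen
    have hdrop : s.drop (n + 1) = m.drop (n + 1) := by
      rw [hs, List.drop_append, hlen]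
      have h2 : ((m.take n).map pvFlipC).drop (n + 1) = [] :=
        List.drop_eq_nil_of_le (by omega)
      rw [h2, List.nil_append, List.drop_drop]
      congr 1
      omega
    have hslice1 : PySem.List.slice s none (some (n : Int)) = s.take n :=
      PySem.List.slice_to_natCast s n
    have hslice2 : PySem.List.slice s (some ((n : Int) + 1)) none = s.drop (n + 1) := by
      rw [show ((n : Int) + 1) = ((n + 1 : Nat) : Int) by push_cast; ring]
      exact PySem.List.slice_from_natCast s (n + 1)
    have htakeS : m.take (n + 1) = m.take n ++ [m[n]] := by
      rw [List.take_add_one]; simp [List.getElem?_eq_getElem hlt]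
    rw [show List.foldl pvStepFlip s [(n : Int)] = pvStepFlip s (n : Int) by simp]
    unfold pvStepFlip
    rw [hget, hslice1, hslice2, htake, hdrop, htakeS]
    have hdropS : m.drop n = m[n] :: m.drop (n + 1) := (List.getElem_cons_drop hlt).symm
    by_cases h1 : m[n] = '1'
    · simp [h1, pvFlipC]
    · by_cases h0 : m[n] = '0'
      · simp [h0, pvFlipC]
      · rw [hs, hdropS]
        have hfix : pvFlipC m[n] = m[n] := by simp [pvFlipC, h0, h1]
        simp only [List.map_append, List.map_cons, List.map_nil, hfix, List.append_assoc,
          List.cons_append, List.nil_append]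
        rw [if_neg (by simp [h1]), if_neg (by simp [h0])]

lemma valLoop_eq (m : List Char) (n : Nat) (hn : n ≤ m.length) (s0 : Nat) (d : Int) :
    (PySem.List.pyRange (n : Int) 0 (-1)).foldl (pvStepVal m) (s0, d)
      = (s0 + n, d + 2 ^ s0 * pvV (m.take n)) := by
  induction n generalizing s0 d with
  | zero => simp [PySem.List.pyRange_neg_one_eq_nil, pvV]
  | succ n ih =>
    have hn' : n ≤ m.length := Nat.le_of_succ_le hn
    have hlt : n < m.length := hn
    rw [PySem.List.pyRange_neg_one_cons (by exact_mod_cast Nat.succ_pos n)]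
    rw [show ((n + 1 : Nat) : Int) - 1 = (n : Int) by push_cast; ring]
    have hget : PySem.List.pyGet? m (((n + 1 : Nat) : Int) - 1) = some m[n] := by
      rw [show ((n + 1 : Nat) : Int) - 1 = (n : Int) by push_cast; ring,
          PySem.List.pyGet?_natCast]
      simp [List.getElem?_eq_getElem hlt]
    have htakeS : m.take (n + 1) = m.take n ++ [m[n]] := by
      rw [List.take_add_one]; simp [List.getElem?_eq_getElem hlt]
    rw [List.foldl_cons]
    by_cases h1 : m[n] = '1'
    · have hstep : pvStepVal m (s0, d) ((n + 1 : Nat) : Int) = (s0 + 1, d + 2 ^ s0) := by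
        simp [pvStepVal, List.getElem?_eq_getElem hlt, h1]
      rw [hstep, ih hn' (s0 + 1) (d + 2 ^ s0), htakeS, pvV_append]
      refine Prod.ext (by omega) ?_
      simp [pvBit, h1, pow_succ]; ring
    · have hstep : pvStepVal m (s0, d) ((n + 1 : Nat) : Int) = (s0 + 1, d) := by
        simp [pvStepVal, List.getElem?_eq_getElem hlt, h1]
      rw [hstep, ih hn' (s0 + 1) d, htakeS, pvV_append]
      refine Prod.ext (by omega) ?_
      simp [pvBit, h1, pow_succ]; ring

-- ===== VERDICT (by name: the statement is the Claim_ definition above) =====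
theorem binaryFlip_spec : Claim_equal_binaryFlip := by
  intro s _
  unfold Spec_binaryFlip binaryFlip binaryFlip_alt
  rw [altFold]
  have hA1 := flipLoop_eq s.toList s.toList.length le_rfl
  simp only [List.take_length, List.drop_length, List.append_nil] at hA1
  simp only [hA1]
  have hlen : (s.toList.map pvFlipC).length = s.toList.length := by simp
  have hA2 := valLoop_eq (s.toList.map pvFlipC) (s.toList.map pvFlipC).length le_rfl 0 0
  simp only [List.take_length] at hA2
  rw [hA2]
  simp [pvV, List.foldl_map]
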